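-- pv_equiv track=rewrite | github.com/Brahim-Mahmoudi/SpecDetect4LLM_ICSE | Prevalence/Precision_Calculation/extract_llm_files_ast.py | _provider_for_module
-- ===== SOURCE A (Python) =====
-- from typing import Dict, List, Optional, Set, Tuple
--
-- PROVIDER_MODULES = {
--     "openai": {"openai"},
--     "anthropic": {"anthropic"},
--     "transformers": {"transformers"},
--     "ollama": {"ollama"},
--     "vllm": {"vllm"},
--     "llama_cpp": {"llama_cpp", "llama_cpp_python"},
--     "google_genai": {"google.generativeai", "google.ai.generativelanguage", "vertexai"},
--     "openrouter": {"openrouter"},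
--     "langchain": {"langchain", "langchain_core", "langchain_openai", "langchain_community"},
--     "llama_index": {"llama_index", "gpt_index"},
--     "groq": {"groq"},
--     "mistralai": {"mistralai"},
--     "cohere": {"cohere"},
--     "google_genai": {"google.generativeai", "vertexai", "google.ai.generativelanguage"},
--     "bedrock": {"boto3"},  # Amazon Bedrock client
--     }
--
-- def _provider_for_module(modname: str) -> Optional[str]:
--     if not modname:
--         return None
--     for prov, modules in PROVIDER_MODULES.items():
--         for m in modules:
--             if modname == m or modname.startswith(m + "."):
--                 return prov
--     return None
-- ===== SOURCE B (Python) =====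
-- from typing import Dict, List, Optional, Set, Tuple
--
-- PROVIDER_MODULES = {
--     "openai": {"openai"},
--     "anthropic": {"anthropic"},
--     "transformers": {"transformers"},
--     "ollama": {"ollama"},
--     "vllm": {"vllm"},
--     "llama_cpp": {"llama_cpp", "llama_cpp_python"},
--     "google_genai": {"google.generativeai", "google.ai.generativelanguage", "vertexai"},
--     "openrouter": {"openrouter"},
--     "langchain": {"langchain", "langchain_core", "langchain_openai", "langchain_community"},
--     "llama_index": {"llama_index", "gpt_index"},
--     "groq": {"groq"},
--     "mistralai": {"mistralai"},
--     "cohere": {"cohere"},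
--     "google_genai": {"google.generativeai", "vertexai", "google.ai.generativelanguage"},
--     "bedrock": {"boto3"},  # Amazon Bedrock client
--     }
--
-- # Flat reverse index: module name -> provider (no table module is a dot-prefix
-- # of another, so the mapping is unambiguous).
-- MODULE_TO_PROVIDER = {m: prov for prov, modules in PROVIDER_MODULES.items() for m in modules}
--
-- def _provider_for_module(modname: str) -> Optional[str]:
--     if not modname:
--         return None
--     cuts = [i for i, ch in enumerate(modname) if ch == "."]
--     for prefix in [modname] + [modname[:i] for i in reversed(cuts)]:
--         prov = MODULE_TO_PROVIDER.get(prefix)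
--         if prov is not None:
--             return prov
--     return None
-- ===== Notes on version B (the rewrite author's own statement) =====
-- stated objective: idiomatic
-- what changed: Replaces the scan of every provider/module table entry with a startswith test by a flat reverse-lookup dict indexed by the dot-boundary prefixes of the input module name.
import Mathlib
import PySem

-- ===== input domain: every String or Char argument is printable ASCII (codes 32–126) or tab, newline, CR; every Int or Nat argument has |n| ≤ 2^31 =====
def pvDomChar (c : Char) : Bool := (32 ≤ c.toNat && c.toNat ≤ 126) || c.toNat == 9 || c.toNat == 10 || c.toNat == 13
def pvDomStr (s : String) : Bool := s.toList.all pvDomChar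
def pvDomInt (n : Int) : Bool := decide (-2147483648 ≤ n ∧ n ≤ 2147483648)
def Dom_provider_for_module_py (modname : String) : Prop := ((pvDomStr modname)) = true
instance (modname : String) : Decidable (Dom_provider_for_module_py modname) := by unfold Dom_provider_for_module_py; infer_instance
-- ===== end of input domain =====

-- B replaces A's scan of every provider/module table entry (with a startswith test per entry)
-- by a flat reverse-lookup dict indexed by the dot-boundary prefixes of the input (idiomatic).


-- ===== PORT A =====
-- the loop-body test 'modname == m or modname.startswith(m + ".")' (strings kept as List Char,
-- PySem's string representation)
def pvMatchA (s m : List Char) : Bool := s == m || PySem.Chars.startswith s (m ++ ['.'])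

-- PROVIDER_MODULES: the Python dict literal repeats the key "google_genai"; dict semantics keep
-- the FIRST position with the SECOND value, so it appears once here.  The set values are kept in
-- source order; no module matches twice (proved below), so set-iteration order cannot matter.
def pvTableA : List (String × List (List Char)) :=
  [ ("openai", ["openai".toList])
  , ("anthropic", ["anthropic".toList])
  , ("transformers", ["transformers".toList])
  , ("ollama", ["ollama".toList])
  , ("vllm", ["vllm".toList])
  , ("llama_cpp", ["llama_cpp".toList, "llama_cpp_python".toList])
  , ("google_genai", ["google.generativeai".toList, "vertexai".toList, "google.ai.generativelanguage".toList])
  , ("openrouter", ["openrouter".toList])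
  , ("langchain", ["langchain".toList, "langchain_core".toList, "langchain_openai".toList, "langchain_community".toList])
  , ("llama_index", ["llama_index".toList, "gpt_index".toList])
  , ("groq", ["groq".toList])
  , ("mistralai", ["mistralai".toList])
  , ("cohere", ["cohere".toList])
  , ("bedrock", ["boto3".toList]) ]

-- the nested 'for prov, modules … for m in modules … return prov' loops
def pvGoA (s : List Char) : List (String × List (List Char)) → Option String
  | [] => none
  | (prov, mods) :: rest => if mods.any (fun m => pvMatchA s m) then some prov else pvGoA s rest

def provider_for_module_py (modname : String) : Option String :=
  if modname = "" then none else pvGoA modname.toList pvTableA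

-- ===== PORT B =====
-- MODULE_TO_PROVIDER = {m: prov for prov, modules in PROVIDER_MODULES.items() for m in modules}
def pvPairsB : List (List Char × String) :=
  [ ("openai".toList, "openai")
  , ("anthropic".toList, "anthropic")
  , ("transformers".toList, "transformers")
  , ("ollama".toList, "ollama")
  , ("vllm".toList, "vllm")
  , ("llama_cpp".toList, "llama_cpp"), ("llama_cpp_python".toList, "llama_cpp")
  , ("google.generativeai".toList, "google_genai"), ("vertexai".toList, "google_genai"), ("google.ai.generativelanguage".toList, "google_genai")
  , ("openrouter".toList, "openrouter")
  , ("langchain".toList, "langchain"), ("langchain_core".toList, "langchain"), ("langchain_openai".toList, "langchain"), ("langchain_community".toList, "langchain")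
  , ("llama_index".toList, "llama_index"), ("gpt_index".toList, "llama_index")
  , ("groq".toList, "groq")
  , ("mistralai".toList, "mistralai")
  , ("cohere".toList, "cohere")
  , ("boto3".toList, "bedrock") ]

def pvDictB : PySem.Dict (List Char) String := PySem.Dict.ofList pvPairsB

-- cuts = [i for i, ch in enumerate(modname) if ch == "."]
def pvCutsB (s : List Char) : List Int :=
  (PySem.List.enumerate s 0).filterMap (fun p => if p.2 == '.' then some p.1 else none)

-- [modname] + [modname[:i] for i in reversed(cuts)]
def pvCandsB (s : List Char) : List (List Char) :=
  s :: (pvCutsB s).reverse.map (fun i => PySem.List.slice s none (some i))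

def provider_for_module_py_alt (modname : String) : Option String :=
  if modname = "" then none
  else (pvCandsB modname.toList).findSome? (fun c => pvDictB.get? c)

-- ===== PRECONDITION & SPEC =====
def Spec_provider_for_module_py (modname : String) (out : Option String) : Prop := out = provider_for_module_py_alt modname
instance (modname : String) (out : Option String) : Decidable (Spec_provider_for_module_py modname out) := by unfold Spec_provider_for_module_py; infer_instance

-- ===== CLAIM (what is proved, stated in full; the proofs are below) =====
def Claim_equal_provider_for_module_py : Prop := ∀ (modname : String), Dom_provider_for_module_py modname → Spec_provider_for_module_py modname (provider_for_module_py modname)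

-- ===== LEMMAS AND PROOFS =====

-- A's nested loops, flattened into one pass over (module, provider) pairs
def pvSpecF (s : List Char) : Option String :=
  pvPairsB.findSome? (fun e => if pvMatchA s e.1 then some e.2 else none)

theorem pvInner (s : List Char) (prov : String) (mods : List (List Char)) :
    (mods.map (fun m => (m, prov))).findSome? (fun e => if pvMatchA s e.1 then some e.2 else none)
      = if mods.any (fun m => pvMatchA s m) then some prov else none := by
  induction mods with
  | nil => rfl
  | cons m ms ih =>
    by_cases hm : pvMatchA s m = true <;> simp [hm, ih]

theorem pvGoA_eq_findSome (s : List Char) (t : List (String × List (List Char))) :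
    pvGoA s t = (t.flatMap (fun pr => pr.2.map (fun m => (m, pr.1)))).findSome?
      (fun e => if pvMatchA s e.1 then some e.2 else none) := by
  induction t with
  | nil => rfl
  | cons hd rest ih =>
    obtain ⟨prov, mods⟩ := hd
    simp only [pvGoA, List.flatMap_cons, List.findSome?_append, pvInner]
    by_cases hm : mods.any (fun m => pvMatchA s m) = true <;> simp [hm, ih]

set_option maxRecDepth 20000 in
theorem pvFlat_eq : pvTableA.flatMap (fun pr => pr.2.map (fun m => (m, pr.1))) = pvPairsB := by decide

theorem pvA_eq_spec (modname : String) (h : ¬ modname = "") :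
    provider_for_module_py modname = pvSpecF modname.toList := by
  simp only [provider_for_module_py, if_neg h, pvGoA_eq_findSome, pvFlat_eq, pvSpecF]

-- pvMatchA unfolded to propositions
theorem pvMatchA_iff (s m : List Char) : pvMatchA s m = true ↔ (s = m ∨ (m ++ ['.']) <+: s) := by
  simp [pvMatchA, PySem.Chars.startswith_iff]

-- membership in the cut list = a '.' at that (Nat) index
theorem mem_pvCutsB (s : List Char) (i : Int) :
    i ∈ pvCutsB s ↔ ∃ (k : Nat) (hk : k < s.length), i = (k : Int) ∧ s[k] = '.' := by
  simp only [pvCutsB, List.mem_filterMap, PySem.List.mem_enumerate_iff]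
  constructor
  · rintro ⟨p, ⟨k, hk, hp⟩, hif⟩
    subst hp
    by_cases hc : s[k] = '.'
    · refine ⟨k, hk, ?_, hc⟩
      simp [hc] at hif
      omega
    · simp [hc] at hif
  · rintro ⟨k, hk, rfl, hc⟩
    exact ⟨((0 + k : Int), s[k]), ⟨k, hk, rfl⟩, by simp [hc]⟩

-- every candidate is s itself or a dot-boundary prefix of s
theorem pvCands_sound (s c : List Char) (hc : c ∈ pvCandsB s) : c = s ∨ (c ++ ['.']) <+: s := by
  simp only [pvCandsB, List.mem_cons, List.mem_map, List.mem_reverse] at hc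
  rcases hc with rfl | ⟨i, hi, rfl⟩
  · exact Or.inl rfl
  · obtain ⟨k, hk, rfl, hdot⟩ := (mem_pvCutsB s i).mp hi
    right
    rw [PySem.List.slice_to_natCast]
    have hdrop : s.drop k = '.' :: s.drop (k + 1) := by
      rw [← List.getElem_cons_drop hk, hdot]
    refine ⟨s.drop (k + 1), ?_⟩
    rw [List.append_assoc, List.singleton_append, ← hdrop, List.take_append_drop]

-- every module matching s is one of s's candidates
theorem pvCands_complete (s m : List Char) (hm : pvMatchA s m = true) : m ∈ pvCandsB s := by
  rcases (pvMatchA_iff s m).mp hm with rfl | ⟨t, ht⟩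
  · exact List.mem_cons_self ..
  · subst ht
    have hk : m.length < (m ++ ['.'] ++ t).length := by
      simp only [List.length_append, List.length_cons, List.length_nil]; omega
    have hdot : (m ++ ['.'] ++ t)[m.length]'hk = '.' := by
      simp
    have htake : PySem.List.slice (m ++ ['.'] ++ t) none (some (m.length : Int)) = m := by
      rw [PySem.List.slice_to_natCast, List.append_assoc, List.take_left]
    have hcut : (m.length : Int) ∈ pvCutsB (m ++ ['.'] ++ t) :=
      (mem_pvCutsB _ _).mpr ⟨m.length, hk, rfl, hdot⟩
    exact List.mem_cons_of_mem _
      (List.mem_map.mpr ⟨(m.length : Int), List.mem_reverse.mpr hcut, htake⟩)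

-- two distinct modules matching the same s: one is a dot-boundary prefix of the other
theorem pvMatch_cross (s m1 m2 : List Char) (h1 : pvMatchA s m1 = true) (h2 : pvMatchA s m2 = true)
    (hne : m1 ≠ m2) : pvMatchA m2 m1 = true ∨ pvMatchA m1 m2 = true := by
  have key : ∀ a b : List Char, a ++ ['.'] <+: b ++ ['.'] → a ≠ b → (a ++ ['.']) <+: b := by
    intro a b hab hneq
    have hlen : (a ++ ['.']).length ≤ (b ++ ['.']).length := hab.length_le
    simp only [List.length_append, List.length_cons, List.length_nil] at hlen
    have hlt : a.length < b.length := by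
      rcases Nat.lt_or_ge a.length b.length with h | h
      · exact h
      · exact absurd (by simpa using hab.eq_of_length (by simp; omega)) hneq
    rw [List.prefix_iff_eq_take] at hab ⊢
    rw [List.take_append, Nat.sub_eq_zero_of_le (by simp; omega)] at hab
    simpa using hab
  rcases (pvMatchA_iff s m1).mp h1 with he1 | hp1
  · rcases (pvMatchA_iff s m2).mp h2 with he2 | hp2
    · exact absurd (he1.symm.trans he2) hne
    · exact Or.inr ((pvMatchA_iff m1 m2).mpr (Or.inr (he1 ▸ hp2)))
  · rcases (pvMatchA_iff s m2).mp h2 with he2 | hp2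
    · exact Or.inl ((pvMatchA_iff m2 m1).mpr (Or.inr (he2 ▸ hp1)))
    · rcases List.prefix_or_prefix_of_prefix hp1 hp2 with hab | hba
      · exact Or.inl ((pvMatchA_iff m2 m1).mpr (Or.inr (key m1 m2 hab hne)))
      · exact Or.inr ((pvMatchA_iff m1 m2).mpr (Or.inr (key m2 m1 hba hne.symm)))

-- finite check: no table module is (equal to or) a dot-boundary prefix of another table module
set_option maxRecDepth 20000 in
theorem pvNoCross : ∀ e1 ∈ pvPairsB, ∀ e2 ∈ pvPairsB, pvMatchA e2.1 e1.1 = true → e1 = e2 := by decide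

set_option maxRecDepth 20000 in
theorem pvKeysNodup : pvDictB.keys.Nodup := by decide

set_option maxRecDepth 20000 in
theorem pvItems : pvDictB.items = pvPairsB := by decide

-- the dict lookup of a table pair's key, and the pair read back from a successful lookup
theorem pvGet_of_mem (e : List Char × String) (he : e ∈ pvPairsB) : pvDictB.get? e.1 = some e.2 :=
  PySem.Dict.get?_of_mem_items pvDictB (by rw [pvItems]; exact he) pvKeysNodup

theorem pvMem_of_get (c : List Char) (q : String) (hg : pvDictB.get? c = some q) : (c, q) ∈ pvPairsB := by
  rw [← pvItems]; exact PySem.Dict.mem_items_of_get?_eq_some pvDictB hg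

-- at most one table pair matches any given s
theorem pvUnique (s : List Char) (e1 e2 : List Char × String) (h1 : e1 ∈ pvPairsB) (h2 : e2 ∈ pvPairsB)
    (hm1 : pvMatchA s e1.1 = true) (hm2 : pvMatchA s e2.1 = true) : e1 = e2 := by
  by_cases hne : e1.1 = e2.1
  · have g1 := pvGet_of_mem e1 h1
    have g2 := pvGet_of_mem e2 h2
    rw [hne, g2] at g1
    exact Prod.ext hne (Option.some.inj g1).symm
  · rcases pvMatch_cross s e1.1 e2.1 hm1 hm2 hne with h | h
    · exact pvNoCross e1 h1 e2 h2 h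
    · exact (pvNoCross e2 h2 e1 h1 h).symm

-- findSome? over a list with a unique hit
theorem findSome?_of_unique {α β : Type} (l : List α) (f : α → Option β) (m : α) (p : β)
    (hm : m ∈ l) (hf : f m = some p) (hrest : ∀ c ∈ l, c ≠ m → f c = none) :
    l.findSome? f = some p := by
  induction l with
  | nil => cases hm
  | cons a l ih =>
    by_cases ha : a = m
    · subst ha; simp [hf]
    · have hnone : f a = none := hrest a (List.mem_cons_self ..) ha
      have hmem : m ∈ l := by
        rcases List.mem_cons.mp hm with h | h
        · exact absurd h.symm ha
        · exact h
      simp only [List.findSome?_cons, hnone]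
      exact ih hmem (fun c hc hcm => hrest c (List.mem_cons_of_mem _ hc) hcm)

-- a candidate found in the dict matches s
theorem pvCand_match (s c : List Char) (hc : c ∈ pvCandsB s) : pvMatchA s c = true := by
  rcases pvCands_sound s c hc with hcs | hp
  · exact (pvMatchA_iff s c).mpr (Or.inl hcs.symm)
  · exact (pvMatchA_iff s c).mpr (Or.inr hp)

theorem pvB_eq_spec (modname : String) (h : ¬ modname = "") :
    provider_for_module_py_alt modname = pvSpecF modname.toList := by
  simp only [provider_for_module_py_alt, if_neg h]
  cases hspec : pvSpecF modname.toList with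
  | none =>
    have hall := List.findSome?_eq_none_iff.mp hspec
    refine List.findSome?_eq_none_iff.mpr ?_
    intro c hc
    cases hg : pvDictB.get? c with
    | none => rfl
    | some p =>
      exfalso
      have := hall _ (pvMem_of_get c p hg)
      simp [pvCand_match modname.toList c hc] at this
  | some p =>
    obtain ⟨e, he, hfe⟩ := List.exists_of_findSome?_eq_some hspec
    have hm : pvMatchA modname.toList e.1 = true := by
      by_cases hq : pvMatchA modname.toList e.1 = true
      · exact hq
      · simp [hq] at hfe
    have hep : e.2 = p := by simpa [hm] using hfe
    refine findSome?_of_unique _ _ e.1 p (pvCands_complete modname.toList e.1 hm) ?_ ?_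
    · rw [← hep]; exact pvGet_of_mem e he
    · intro c hc hcm
      cases hg : pvDictB.get? c with
      | none => rfl
      | some q =>
        exact absurd (congrArg Prod.fst
          (pvUnique modname.toList (c, q) e (pvMem_of_get c q hg) he
            (pvCand_match modname.toList c hc) hm)) hcm

-- ===== VERDICT (by name: the statement is the Claim_ definition above) =====
theorem provider_for_module_py_spec : Claim_equal_provider_for_module_py := by
  intro modname _
  unfold Spec_provider_for_module_py
  by_cases h : modname = ""
  · simp [provider_for_module_py, provider_for_module_py_alt, h]
  · rw [pvA_eq_spec modname h, pvB_eq_spec modname h]
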